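-- pv_equiv track=rewrite | github.com/Sezima/PythonTask90 | paul.py | paul
-- ===== SOURCE A (Python) =====
-- def paul(x):
--     c = 0
--     for i in x:
--         if i == 'kata':
--             c += 5
--         elif i == 'Petes kata':
--             c += 10
--         elif i == 'life':
--             c += 0
--         else:
--             c += 1
--     if c < 40:
--         return 'Super happy!'
--     elif 70 > c >= 40:
--         return 'Happy!'
--     elif 70 <= c < 100:
--         return 'Sad!'
--     else:
--         return 'Miserable!'
-- ===== SOURCE B (Python) =====
-- def paul(x):
--     k = x.count('kata')
--     p = x.count('Petes kata')
--     l = x.count('life')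
--     c = 5 * k + 10 * p + (len(x) - k - p - l)
--     if c < 40:
--         return 'Super happy!'
--     elif 70 > c >= 40:
--         return 'Happy!'
--     elif 70 <= c < 100:
--         return 'Sad!'
--     else:
--         return 'Miserable!'
-- ===== Notes on version B (the rewrite author's own statement) =====
-- stated objective: idiomatic
-- what changed: Replaces the per-element if/elif accumulator loop with three list.count calls and a closed-form total 5*k + 10*p + (len(x)-k-p-l), keeping the threshold classification.
import Mathlib
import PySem

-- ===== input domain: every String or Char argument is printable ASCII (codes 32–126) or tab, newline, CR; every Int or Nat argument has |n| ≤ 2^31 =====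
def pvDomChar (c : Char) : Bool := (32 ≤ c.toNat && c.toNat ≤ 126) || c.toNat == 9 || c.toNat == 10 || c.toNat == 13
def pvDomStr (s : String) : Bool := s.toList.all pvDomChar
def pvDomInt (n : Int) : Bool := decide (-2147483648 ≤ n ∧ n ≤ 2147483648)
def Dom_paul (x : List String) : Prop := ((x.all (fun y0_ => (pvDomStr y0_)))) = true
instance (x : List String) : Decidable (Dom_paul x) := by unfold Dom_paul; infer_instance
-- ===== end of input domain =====

-- B replaces A's per-element if/elif accumulator loop by three List.count passes and a
-- closed-form total; same O(n) cost, more idiomatic.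

-- ===== PORT A =====
def paul (x : List String) : String :=
  let c : Int := x.foldl (fun c i =>
    if i = "kata" then c + 5
    else if i = "Petes kata" then c + 10
    else if i = "life" then c + 0
    else c + 1) 0
  if c < 40 then "Super happy!"
  else if 70 > c ∧ c ≥ 40 then "Happy!"
  else if 70 ≤ c ∧ c < 100 then "Sad!"
  else "Miserable!"

-- ===== PORT B =====
def paul_alt (x : List String) : String :=
  let k : Int := PySem.List.count x "kata"
  let p : Int := PySem.List.count x "Petes kata"
  let l : Int := PySem.List.count x "life"
  let c : Int := 5 * k + 10 * p + ((x.length : Int) - k - p - l)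
  if c < 40 then "Super happy!"
  else if 70 > c ∧ c ≥ 40 then "Happy!"
  else if 70 ≤ c ∧ c < 100 then "Sad!"
  else "Miserable!"

-- ===== PRECONDITION & SPEC =====
def Spec_paul (x : List String) (out : String) : Prop := out = paul_alt x
instance (x : List String) (out : String) : Decidable (Spec_paul x out) := by unfold Spec_paul; infer_instance

-- ===== CLAIM (what is proved, stated in full; the proofs are below) =====
def Claim_equal_paul : Prop := ∀ (x : List String), Dom_paul x → Spec_paul x (paul x)

-- ===== LEMMAS AND PROOFS =====

lemma paul_fold_closed (x : List String) (c0 : Int) :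
    x.foldl (fun c i =>
      if i = "kata" then c + 5
      else if i = "Petes kata" then c + 10
      else if i = "life" then c + 0
      else c + 1) c0
    = c0 + 5 * (PySem.List.count x "kata" : Int)
        + 10 * (PySem.List.count x "Petes kata" : Int)
        + ((x.length : Int) - PySem.List.count x "kata"
            - PySem.List.count x "Petes kata" - PySem.List.count x "life") := by
  induction x generalizing c0 with
  | nil => simp [PySem.List.count]
  | cons h t ih =>
    simp only [List.foldl_cons, ih, PySem.List.count, List.count_cons, List.length_cons]
    by_cases h1 : h = "kata"
    · simp [h1]; ring
    · by_cases h2 : h = "Petes kata"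
      · simp [h2]; ring
      · by_cases h3 : h = "life"
        · simp [h3]; ring
        · simp [h1, h2, h3]; ring

-- ===== VERDICT (by name: the statement is the Claim_ definition above) =====
theorem paul_spec : Claim_equal_paul := by
  intro x _
  unfold Spec_paul paul paul_alt
  simp only [paul_fold_closed, zero_add]
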